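-- pv_equiv track=rewrite | github.com/MrBananaHuman/AlgoAlgo | BestScorePersons.py | solution
-- ===== SOURCE A (Python) =====
-- def solution(answers):
--     answer = []
--     one_num = 0
--     two_num = 0
--     three_num = 0
--     one_pattern = [1, 2, 3, 4, 5]
--     two_pattern = [2, 1, 2, 3, 2, 4, 2, 5]
--     three_pattern = [3, 3, 1, 1, 2, 2, 4, 4, 5, 5]
--     for i, an in enumerate(answers):
--         if one_pattern[i % len(one_pattern)] == an:
--             one_num += 1
--         if two_pattern[i % len(two_pattern)] == an:
--             two_num += 1
--         if three_pattern[i % len(three_pattern)] == an: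
--             three_num += 1
--     max_num = max(one_num, two_num, three_num)
--     if one_num == max_num:
--         answer.append(1)
--     if two_num == max_num:
--         answer.append(2)
--     if three_num == max_num:
--         answer.append(3)
--
--     return answer
-- ===== SOURCE B (Python) =====
-- def solution(answers):
--     patterns = [[1, 2, 3, 4, 5],
--                 [2, 1, 2, 3, 2, 4, 2, 5],
--                 [3, 3, 1, 1, 2, 2, 4, 4, 5, 5]]
--     L = 40  # lcm of the pattern lengths: position i behaves like residue i % 40 for all three
--     expanded = [[p[r % len(p)] for r in range(L)] for p in patterns]
--     hist = {}
--     for i, a in enumerate(answers):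
--         k = (i % L, a)
--         hist[k] = hist.get(k, 0) + 1
--     scores = [sum(hist.get((r, e[r]), 0) for r in range(L)) for e in expanded]
--     m = max(scores)
--     return [i + 1 for i, s in enumerate(scores) if s == m]
-- ===== Notes on version B (the rewrite author's own statement) =====
-- stated objective: alternative
-- what changed: Replaces A's interleaved per-element comparison loop with three counters by a histogram algorithm: one pass builds a dict counting (index mod 40, answer) pairs (40 = lcm of the pattern lengths), each pattern's score is then read off as 40 histogram lookups against its expanded residue table, and winners are selected uniformly by max over the scores list.
import Mathlib
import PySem

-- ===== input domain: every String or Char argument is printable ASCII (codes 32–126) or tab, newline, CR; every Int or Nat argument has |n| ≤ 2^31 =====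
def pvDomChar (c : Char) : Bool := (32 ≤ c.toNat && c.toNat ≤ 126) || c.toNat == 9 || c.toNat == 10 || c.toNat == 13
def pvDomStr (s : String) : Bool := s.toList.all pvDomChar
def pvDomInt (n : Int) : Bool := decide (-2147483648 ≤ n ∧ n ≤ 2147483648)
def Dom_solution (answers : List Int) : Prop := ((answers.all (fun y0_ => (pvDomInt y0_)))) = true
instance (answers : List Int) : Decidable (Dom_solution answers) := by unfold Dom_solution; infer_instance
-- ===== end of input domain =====

-- B replaces A's interleaved comparison loop (three counters, one test per pattern per element)
-- by a histogram algorithm: one pass counts (index mod 40, answer) pairs, then each pattern's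
-- score is read off as 40 histogram lookups against its expanded residue table (alternative).

-- ===== PORT A =====
def solution (answers : List Int) : List Int :=
  let onePattern : List Int := [1, 2, 3, 4, 5]
  let twoPattern : List Int := [2, 1, 2, 3, 2, 4, 2, 5]
  let threePattern : List Int := [3, 3, 1, 1, 2, 2, 4, 4, 5, 5]
  let st :=
    (PySem.List.enumerate answers).foldl
      (fun (st : Int × Int × Int) ia =>
        let oneNum := if PySem.List.pyGetD onePattern (PySem.Int.mod ia.1 ((onePattern.length : Int))) 0 == ia.2 then st.1 + 1 else st.1
        let twoNum := if PySem.List.pyGetD twoPattern (PySem.Int.mod ia.1 ((twoPattern.length : Int))) 0 == ia.2 then st.2.1 + 1 else st.2.1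
        let threeNum := if PySem.List.pyGetD threePattern (PySem.Int.mod ia.1 ((threePattern.length : Int))) 0 == ia.2 then st.2.2 + 1 else st.2.2
        (oneNum, twoNum, threeNum))
      (0, 0, 0)
  let maxNum := max st.1 (max st.2.1 st.2.2)
  let answer : List Int := []
  let answer := if st.1 == maxNum then answer ++ [1] else answer
  let answer := if st.2.1 == maxNum then answer ++ [2] else answer
  let answer := if st.2.2 == maxNum then answer ++ [3] else answer
  answer

-- ===== PORT B =====
-- [p[r % len(p)] for r in range(40)]
def expandPat (p : List Int) : List Int :=
  (PySem.List.pyRange 0 40 1).map (fun r => PySem.List.pyGetD p (PySem.Int.mod r ((p.length : Int))) 0)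

-- sum(hist.get((r, e[r]), 0) for r in range(40))
def histScore (hist : PySem.Dict (Int × Int) Int) (e : List Int) : Int :=
  ((PySem.List.pyRange 0 40 1).map (fun r => hist.getD (r, PySem.List.pyGetD e r 0) 0)).sum

def solution_alt (answers : List Int) : List Int :=
  let patterns : List (List Int) :=
    [[1, 2, 3, 4, 5], [2, 1, 2, 3, 2, 4, 2, 5], [3, 3, 1, 1, 2, 2, 4, 4, 5, 5]]
  let expanded := patterns.map expandPat
  let hist : PySem.Dict (Int × Int) Int :=
    (PySem.List.enumerate answers).foldl
      (fun d ia =>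
        let k : Int × Int := (PySem.Int.mod ia.1 40, ia.2)
        d.insert k (d.getD k 0 + 1))
      PySem.Dict.empty
  let scores := expanded.map (histScore hist)
  match PySem.List.max? scores (fun x => x) with
  | none => []
  | some m =>
      (PySem.List.enumerate scores).filterMap
        (fun is => if is.2 == m then some (is.1 + 1) else none)

-- ===== PRECONDITION & SPEC =====
def Spec_solution (answers : List Int) (out : List Int) : Prop := out = solution_alt answers
instance (answers : List Int) (out : List Int) : Decidable (Spec_solution answers out) := by unfold Spec_solution; infer_instance

-- ===== CLAIM (what is proved, stated in full; the proofs are below) =====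
def Claim_equal_solution : Prop := ∀ (answers : List Int), Dom_solution answers → Spec_solution answers (solution answers)

-- ===== LEMMAS AND PROOFS =====

-- A's interleaved fold computes, component-wise, the three independent pattern scores.
lemma fold_eq_scores (xs : List Int) (s a b c : Int) :
    (PySem.List.enumerate xs s).foldl
      (fun (st : Int × Int × Int) ia =>
        let oneNum := if PySem.List.pyGetD [1, 2, 3, 4, 5] (PySem.Int.mod ia.1 (([1, 2, 3, 4, 5] : List Int).length : Int)) 0 == ia.2 then st.1 + 1 else st.1
        let twoNum := if PySem.List.pyGetD [2, 1, 2, 3, 2, 4, 2, 5] (PySem.Int.mod ia.1 (([2, 1, 2, 3, 2, 4, 2, 5] : List Int).length : Int)) 0 == ia.2 then st.2.1 + 1 else st.2.1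
        let threeNum := if PySem.List.pyGetD [3, 3, 1, 1, 2, 2, 4, 4, 5, 5] (PySem.Int.mod ia.1 (([3, 3, 1, 1, 2, 2, 4, 4, 5, 5] : List Int).length : Int)) 0 == ia.2 then st.2.2 + 1 else st.2.2
        (oneNum, twoNum, threeNum))
      (a, b, c)
    = (a + ((PySem.List.enumerate xs s).map
            (fun ia => if ia.2 == PySem.List.pyGetD [1, 2, 3, 4, 5] (PySem.Int.mod ia.1 (([1, 2, 3, 4, 5] : List Int).length : Int)) 0 then (1 : Int) else 0)).sum,
       b + ((PySem.List.enumerate xs s).map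
            (fun ia => if ia.2 == PySem.List.pyGetD [2, 1, 2, 3, 2, 4, 2, 5] (PySem.Int.mod ia.1 (([2, 1, 2, 3, 2, 4, 2, 5] : List Int).length : Int)) 0 then (1 : Int) else 0)).sum,
       c + ((PySem.List.enumerate xs s).map
            (fun ia => if ia.2 == PySem.List.pyGetD [3, 3, 1, 1, 2, 2, 4, 4, 5, 5] (PySem.Int.mod ia.1 (([3, 3, 1, 1, 2, 2, 4, 4, 5, 5] : List Int).length : Int)) 0 then (1 : Int) else 0)).sum) := by
  induction xs generalizing s a b c with
  | nil => simp [PySem.List.enumerate_nil]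
  | cons x t ih =>
      rw [PySem.List.enumerate_cons]
      simp only [List.foldl_cons, List.map_cons, List.sum_cons, ih]
      have h1 : ∀ (u v : Int), (u == v) = (v == u) := by
        intro u v; by_cases h : u = v
        · simp [h]
        · simp [h, Ne.symm h]
      rw [h1 x, h1 x, h1 x]
      split_ifs <;> simp [add_assoc]

-- a 0/1 indicator sum over a range containing no r with (q,a) = (r, f r) is 0
lemma sel_sum_zero' (q a hi : Int) (f : Int → Int) (n : Nat) :
    ∀ lo : Int, hi - lo ≤ n → (q < lo ∨ hi ≤ q) →
    ((PySem.List.pyRange lo hi 1).map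
      (fun r => if ((q, a) : Int × Int) == (r, f r) then (1 : Int) else 0)).sum = 0 := by
  induction n with
  | zero =>
      intro lo hn _
      rw [PySem.List.pyRange_one_eq_nil (by omega)]
      simp
  | succ n ih =>
      intro lo hn h
      by_cases hlt : lo < hi
      · rw [PySem.List.pyRange_one_cons hlt]
        simp only [List.map_cons, List.sum_cons]
        have hne : ¬ (((q, a) : Int × Int) == (lo, f lo)) = true := by
          simp only [beq_iff_eq, Prod.mk.injEq, not_and]
          intro hq; omega
        rw [if_neg hne, ih (lo + 1) (by omega) (by omega)]
        simp
      · rw [PySem.List.pyRange_one_eq_nil (by omega)]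
        simp

lemma sel_sum_zero (q a lo hi : Int) (f : Int → Int) (h : q < lo ∨ hi ≤ q) :
    ((PySem.List.pyRange lo hi 1).map
      (fun r => if ((q, a) : Int × Int) == (r, f r) then (1 : Int) else 0)).sum = 0 :=
  sel_sum_zero' q a hi f (hi - lo).toNat lo (by omega) h

-- the selector indicator sums to exactly the match indicator when 0 ≤ q < 40
lemma sel_sum (q a : Int) (f : Int → Int) (h0 : 0 ≤ q) (h40 : q < 40) :
    ((PySem.List.pyRange 0 40 1).map
      (fun r => if ((q, a) : Int × Int) == (r, f r) then (1 : Int) else 0)).sum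
    = if a == f q then 1 else 0 := by
  rw [PySem.List.pyRange_one_append 0 q 40 h0 (by omega),
      PySem.List.pyRange_one_cons (by omega : q < 40)]
  simp only [List.map_append, List.map_cons, List.sum_append, List.sum_cons]
  rw [sel_sum_zero q a 0 q f (Or.inr le_rfl),
      sel_sum_zero q a (q + 1) 40 f (Or.inl (by omega))]
  have : (((q, a) : Int × Int) == (q, f q)) = (a == f q) := by
    simp [Prod.ext_iff]
  rw [this]; ring

-- the histogram lookups for an expanded table sum to the direct match count
lemma hist_sum_eq (xs : List Int) (s : Int) (f : Int → Int) :
    ((PySem.List.pyRange 0 40 1).map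
      (fun r => ((PySem.List.enumerate xs s).map
          (fun ia => ((PySem.Int.mod ia.1 40, ia.2) : Int × Int))).count (r, f r))).sum
    = ((PySem.List.enumerate xs s).map
        (fun ia => if ia.2 == f (PySem.Int.mod ia.1 40) then (1 : Int) else 0)).sum := by
  induction xs generalizing s with
  | nil => simp [PySem.List.enumerate_nil]
  | cons x t ih =>
      rw [PySem.List.enumerate_cons]
      simp only [List.map_cons, List.sum_cons, List.count_cons]
      have split :
          ((PySem.List.pyRange 0 40 1).map
            (fun r => (((PySem.List.enumerate t (s+1)).map
                (fun ia => ((PySem.Int.mod ia.1 40, ia.2) : Int × Int))).count (r, f r)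
              + if ((PySem.Int.mod s 40, x) : Int × Int) == (r, f r) then 1 else 0 : Nat))).sum
          = ((PySem.List.pyRange 0 40 1).map
              (fun r => ((PySem.List.enumerate t (s+1)).map
                (fun ia => ((PySem.Int.mod ia.1 40, ia.2) : Int × Int))).count (r, f r))).sum
            + ((PySem.List.pyRange 0 40 1).map
              (fun r => if ((PySem.Int.mod s 40, x) : Int × Int) == (r, f r) then (1 : Nat) else 0)).sum := by
        induction (PySem.List.pyRange 0 40 1) with
        | nil => simp
        | cons r rs ihr => simp only [List.map_cons, List.sum_cons, ihr]; omega
      have hq0 := PySem.Int.mod_nonneg s (b := 40) (by omega)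
      have hq40 := PySem.Int.mod_lt s (b := 40) (by omega)
      have hsel := sel_sum (PySem.Int.mod s 40) x f hq0 hq40
      -- transfer the Nat indicator sum to the Int one
      have hnat :
          (((PySem.List.pyRange 0 40 1).map
            (fun r => if ((PySem.Int.mod s 40, x) : Int × Int) == (r, f r) then (1 : Nat) else 0)).sum : Int)
          = ((PySem.List.pyRange 0 40 1).map
            (fun r => if ((PySem.Int.mod s 40, x) : Int × Int) == (r, f r) then (1 : Int) else 0)).sum := by
        induction (PySem.List.pyRange 0 40 1) with
        | nil => simp
        | cons r rs ihr =>
            simp only [List.map_cons, List.sum_cons, Nat.cast_add, ihr]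
            split_ifs <;> simp
      rw [split, Nat.cast_add, ih, hnat, hsel]
      ring

-- the histogram score of an expanded pattern table equals the direct per-element match count
lemma histScore_eq (answers p : List Int)
    (hdvd : ((p.length : Int)) ∣ 40) (hpos : 0 < (p.length : Int)) :
    histScore
      ((PySem.List.enumerate answers).foldl
        (fun d ia =>
          let k : Int × Int := (PySem.Int.mod ia.1 40, ia.2)
          d.insert k (d.getD k 0 + 1))
        PySem.Dict.empty)
      (expandPat p)
    = ((PySem.List.enumerate answers).map
        (fun ia => if ia.2 == PySem.List.pyGetD p (PySem.Int.mod ia.1 ((p.length : Int))) 0 then (1 : Int) else 0)).sum := by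
  have hfold :
      (PySem.List.enumerate answers).foldl
        (fun d ia =>
          let k : Int × Int := (PySem.Int.mod ia.1 40, ia.2)
          d.insert k (d.getD k 0 + 1))
        (PySem.Dict.empty : PySem.Dict (Int × Int) Int)
      = ((PySem.List.enumerate answers).map
          (fun ia => ((PySem.Int.mod ia.1 40, ia.2) : Int × Int))).foldl
          (fun d x => d.insert x (d.getD x 0 + 1)) PySem.Dict.empty := by
    rw [List.foldl_map]
  unfold histScore
  rw [hfold]
  have hgetD : ∀ v : Int × Int,
      (((PySem.List.enumerate answers).map
          (fun ia => ((PySem.Int.mod ia.1 40, ia.2) : Int × Int))).foldl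
          (fun d x => d.insert x (d.getD x 0 + 1)) PySem.Dict.empty).getD v 0
      = (((PySem.List.enumerate answers).map
          (fun ia => ((PySem.Int.mod ia.1 40, ia.2) : Int × Int))).count v : Int) := by
    intro v
    rw [PySem.Dict.getD_foldl_insert_add_one, PySem.Dict.getD_empty]
    ring
  simp only [hgetD]
  -- the expanded table reproduces the pattern lookup at every residue
  have hexp : ∀ i : Int,
      PySem.List.pyGetD (expandPat p) (PySem.Int.mod i 40) 0
      = PySem.List.pyGetD p (PySem.Int.mod i ((p.length : Int))) 0 := by
    intro i
    unfold expandPat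
    rw [PySem.List.pyGetD_map_pyRange_of_nonneg _ 40 _ _
          (PySem.Int.mod_nonneg i (by omega)) (PySem.Int.mod_lt i (by omega))]
    have h1 : PySem.Int.mod (PySem.Int.mod i 40) ((p.length : Int))
        = PySem.Int.mod i ((p.length : Int)) := by
      rw [PySem.Int.mod_eq_emod_of_pos hpos, PySem.Int.mod_eq_emod_of_pos hpos,
          PySem.Int.mod_eq_emod_of_pos (by omega : (0:Int) < 40)]
      exact Int.emod_emod_of_dvd i hdvd
    rw [h1]
  -- cast the Nat count-sum to the Int indicator sum and finish with hist_sum_eq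
  have hcast :
      ((PySem.List.pyRange 0 40 1).map
        (fun r => (((PySem.List.enumerate answers).map
            (fun ia => ((PySem.Int.mod ia.1 40, ia.2) : Int × Int))).count
              (r, PySem.List.pyGetD (expandPat p) r 0) : Int))).sum
      = (((PySem.List.pyRange 0 40 1).map
          (fun r => ((PySem.List.enumerate answers).map
            (fun ia => ((PySem.Int.mod ia.1 40, ia.2) : Int × Int))).count
              (r, PySem.List.pyGetD (expandPat p) r 0))).sum : Int) := by
    induction (PySem.List.pyRange 0 40 1) with
    | nil => simp
    | cons r rs ihr => simp only [List.map_cons, List.sum_cons, Nat.cast_add, ihr]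
  rw [hcast, hist_sum_eq answers 0 (fun r => PySem.List.pyGetD (expandPat p) r 0)]
  exact congrArg List.sum (List.map_congr_left (fun ia _ => by rw [hexp ia.1]))

-- ===== VERDICT (by name: the statement is the Claim_ definition above) =====
set_option maxRecDepth 8000 in
theorem solution_spec : Claim_equal_solution := by
  intro answers _
  unfold Spec_solution solution solution_alt
  simp only []
  rw [fold_eq_scores]
  simp only [List.map_cons, List.map_nil]
  rw [histScore_eq answers [1, 2, 3, 4, 5] (by decide) (by decide),
      histScore_eq answers [2, 1, 2, 3, 2, 4, 2, 5] (by decide) (by decide),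
      histScore_eq answers [3, 3, 1, 1, 2, 2, 4, 4, 5, 5] (by decide) (by decide)]
  simp only [zero_add]
  generalize ((PySem.List.enumerate answers).map
      (fun ia => if ia.2 == PySem.List.pyGetD [1, 2, 3, 4, 5] (PySem.Int.mod ia.1 (([1, 2, 3, 4, 5] : List Int).length : Int)) 0 then (1 : Int) else 0)).sum = s1
  generalize ((PySem.List.enumerate answers).map
      (fun ia => if ia.2 == PySem.List.pyGetD [2, 1, 2, 3, 2, 4, 2, 5] (PySem.Int.mod ia.1 (([2, 1, 2, 3, 2, 4, 2, 5] : List Int).length : Int)) 0 then (1 : Int) else 0)).sum = s2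
  generalize ((PySem.List.enumerate answers).map
      (fun ia => if ia.2 == PySem.List.pyGetD [3, 3, 1, 1, 2, 2, 4, 4, 5, 5] (PySem.Int.mod ia.1 (([3, 3, 1, 1, 2, 2, 4, 4, 5, 5] : List Int).length : Int)) 0 then (1 : Int) else 0)).sum = s3
  simp only [PySem.List.max?_id_cons, List.foldl_cons, List.foldl_nil,
    PySem.List.enumerate_cons, PySem.List.enumerate_nil,
    List.filterMap_cons, List.filterMap_nil]
  norm_num
  split_ifs <;> rfl
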